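-- pv_equiv track=rewrite | github.com/sdeka1997/COMP-130 | Assignment 3 - Statistics/assignment3.py | hist_data
-- ===== SOURCE A (Python) =====
-- def hist_data(score_list):
--     """
--     This function takes a list of scores and determines how many
--     are in each of five equally sized ranges.
--     """
--     counter1 = 0
--     counter2 = 0
--     counter3 = 0
--     counter4 = 0
--     counter5 = 0
--     for num in score_list:
--         if num >= 0:
--             if num < 20:
--                 counter1 = counter1 + 1
--         if num >= 20:
--             if num < 40:
--                 counter2 = counter2 + 1
--         if num >= 40:
--             if num < 60:
--                 counter3 = counter3 + 1
--         if num >= 60: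
--             if num < 80:
--                 counter4 = counter4 + 1
--         if num >= 80:
--             if num < 100:
--                 counter5 = counter5 + 1
--     histlist = [counter1, counter2, counter3, counter4, counter5]
--     return histlist
-- ===== SOURCE B (Python) =====
-- def hist_data(score_list):
--     def count_range(lo, hi):
--         return sum(1 for num in score_list if lo <= num < hi)
--     return [count_range(20 * i, 20 * i + 20) for i in range(5)]
-- ===== Notes on version B (the rewrite author's own statement) =====
-- stated objective: alternative
-- what changed: Replaces A's single stateful pass over five named counters with five independent staged counting passes, one per bucket, produced by a comprehension over the bucket index (no mutable accumulators at all).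
import Mathlib
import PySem

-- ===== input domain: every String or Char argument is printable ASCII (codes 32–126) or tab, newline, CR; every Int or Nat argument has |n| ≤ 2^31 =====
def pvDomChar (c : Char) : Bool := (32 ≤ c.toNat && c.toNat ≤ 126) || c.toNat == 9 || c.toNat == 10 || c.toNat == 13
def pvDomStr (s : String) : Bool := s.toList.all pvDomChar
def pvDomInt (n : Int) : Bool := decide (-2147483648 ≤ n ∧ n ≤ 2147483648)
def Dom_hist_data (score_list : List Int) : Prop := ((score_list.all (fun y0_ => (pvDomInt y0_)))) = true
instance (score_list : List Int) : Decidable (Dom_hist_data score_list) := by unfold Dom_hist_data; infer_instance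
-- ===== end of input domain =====

-- B counts each of the five buckets in its own independent pass (a comprehension over
-- the bucket index), instead of A's single stateful pass over five named counters
-- (objective: alternative decomposition, same O(n) cost up to a constant).

-- ===== PORT A =====
-- five counters, updated by explicit range comparisons in A's order
def hist_data (score_list : List Int) : List Int :=
  let st := score_list.foldl
    (fun (st : Int × Int × Int × Int × Int) (num : Int) =>
      let (c1, c2, c3, c4, c5) := st
      let c1 := if 0 ≤ num then (if num < 20 then c1 + 1 else c1) else c1
      let c2 := if 20 ≤ num then (if num < 40 then c2 + 1 else c2) else c2
      let c3 := if 40 ≤ num then (if num < 60 then c3 + 1 else c3) else c3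
      let c4 := if 60 ≤ num then (if num < 80 then c4 + 1 else c4) else c4
      let c5 := if 80 ≤ num then (if num < 100 then c5 + 1 else c5) else c5
      (c1, c2, c3, c4, c5))
    (0, 0, 0, 0, 0)
  [st.1, st.2.1, st.2.2.1, st.2.2.2.1, st.2.2.2.2]

-- ===== PORT B =====
-- sum(1 for num in score_list if lo <= num < hi)
def pvCountRange (score_list : List Int) (lo hi : Int) : Int :=
  score_list.foldl (fun acc num => if lo ≤ num ∧ num < hi then acc + 1 else acc) 0

-- [count_range(20*i, 20*i+20) for i in range(5)]
def hist_data_alt (score_list : List Int) : List Int :=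
  (PySem.List.pyRange 0 5 1).map (fun i => pvCountRange score_list (20 * i) (20 * i + 20))

-- ===== PRECONDITION & SPEC =====
def Spec_hist_data (score_list : List Int) (out : List Int) : Prop := out = hist_data_alt score_list
instance (score_list : List Int) (out : List Int) : Decidable (Spec_hist_data score_list out) := by unfold Spec_hist_data; infer_instance

-- ===== CLAIM (what is proved, stated in full; the proofs are below) =====
def Claim_equal_hist_data : Prop := ∀ (score_list : List Int), Dom_hist_data score_list → Spec_hist_data score_list (hist_data score_list)

-- ===== LEMMAS AND PROOFS =====

theorem pvCountRange_shift (l : List Int) (lo hi a : Int) :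
    l.foldl (fun acc num => if lo ≤ num ∧ num < hi then acc + 1 else acc) a
      = a + l.foldl (fun acc num => if lo ≤ num ∧ num < hi then acc + 1 else acc) 0 := by
  induction l generalizing a with
  | nil => simp
  | cons x t ih =>
    simp only [List.foldl_cons]
    rw [ih (if lo ≤ x ∧ x < hi then a + 1 else a), ih (if lo ≤ x ∧ x < hi then (0:Int) + 1 else 0)]
    split_ifs <;> omega

theorem pvCountRange_cons (x : Int) (t : List Int) (lo hi : Int) :
    pvCountRange (x :: t) lo hi
      = (if lo ≤ x ∧ x < hi then 1 else 0) + pvCountRange t lo hi := by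
  simp only [pvCountRange, List.foldl_cons]
  rw [pvCountRange_shift t lo hi (if lo ≤ x ∧ x < hi then (0:Int) + 1 else 0)]
  split_ifs <;> omega

theorem hist_loop_eq (l : List Int) (c1 c2 c3 c4 c5 : Int) :
    l.foldl
      (fun (st : Int × Int × Int × Int × Int) (num : Int) =>
        let (c1, c2, c3, c4, c5) := st
        let c1 := if 0 ≤ num then (if num < 20 then c1 + 1 else c1) else c1
        let c2 := if 20 ≤ num then (if num < 40 then c2 + 1 else c2) else c2
        let c3 := if 40 ≤ num then (if num < 60 then c3 + 1 else c3) else c3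
        let c4 := if 60 ≤ num then (if num < 80 then c4 + 1 else c4) else c4
        let c5 := if 80 ≤ num then (if num < 100 then c5 + 1 else c5) else c5
        (c1, c2, c3, c4, c5))
      (c1, c2, c3, c4, c5)
    = (c1 + pvCountRange l 0 20, c2 + pvCountRange l 20 40,
       c3 + pvCountRange l 40 60, c4 + pvCountRange l 60 80,
       c5 + pvCountRange l 80 100) := by
  induction l generalizing c1 c2 c3 c4 c5 with
  | nil => simp [pvCountRange]
  | cons x t ih =>
    simp only [List.foldl_cons]
    rw [ih]
    rw [pvCountRange_cons x t 0 20, pvCountRange_cons x t 20 40,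
        pvCountRange_cons x t 40 60, pvCountRange_cons x t 60 80,
        pvCountRange_cons x t 80 100]
    simp only [Prod.mk.injEq]
    refine ⟨?_, ?_, ?_, ?_, ?_⟩ <;> (split_ifs <;> omega)

-- ===== VERDICT (by name: the statement is the Claim_ definition above) =====
theorem hist_data_spec : Claim_equal_hist_data := by
  intro l _
  unfold Spec_hist_data hist_data hist_data_alt
  rw [hist_loop_eq]
  have hr : PySem.List.pyRange 0 5 1 = [0, 1, 2, 3, 4] := by decide
  rw [hr]
  simp only [List.map]
  norm_num
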